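-- pv_equiv track=rewrite | github.com/kartiksinghanand/python-practice-portfolio | daily_problems/day_03/problem_01.py | word_positions
-- ===== SOURCE A (Python) =====
-- from typing import List, Dict
--
-- def word_positions(words: List[str]) -> Dict[str, List[int]]:
--     word_position : Dict[str, List[int]] = {}
--     enumerated_list = list(enumerate(words))
--     for pair in enumerated_list:
--         if pair[1] not in word_position:
--             word_position[pair[1]] = [x[0] for x in enumerated_list if x[1] == pair[1] ]
--         else:
--             continue
--
--     return word_position
-- ===== SOURCE B (Python) =====
-- def word_positions(words):
--     word_position = {}
--     for i, w in enumerate(words):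
--         word_position.setdefault(w, []).append(i)
--     return word_position
-- ===== Notes on version B (the rewrite author's own statement) =====
-- stated objective: faster
-- what changed: Replaces the per-word rescan of the whole enumerated list (a filtering comprehension for every new word) with a single pass that appends each index to its word's list via dict.setdefault.
import Mathlib
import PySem

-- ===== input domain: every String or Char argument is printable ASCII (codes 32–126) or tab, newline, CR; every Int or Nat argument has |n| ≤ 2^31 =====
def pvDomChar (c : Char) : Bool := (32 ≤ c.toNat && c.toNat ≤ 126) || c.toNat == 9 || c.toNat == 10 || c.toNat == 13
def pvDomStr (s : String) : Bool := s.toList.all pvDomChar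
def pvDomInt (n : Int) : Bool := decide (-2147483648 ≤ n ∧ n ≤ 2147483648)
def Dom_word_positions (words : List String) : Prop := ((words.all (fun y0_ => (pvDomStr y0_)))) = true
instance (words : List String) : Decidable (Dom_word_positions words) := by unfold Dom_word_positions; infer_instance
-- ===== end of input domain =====

-- B replaces A's per-new-word rescan of the enumerated list with one setdefault/append pass (asymptotically faster).

-- ===== PORT A =====
def word_positions (words : List String) : List (String × List Int) :=
  let enumerated_list := PySem.List.enumerate words
  (enumerated_list.foldl
    (fun d pair =>
      if d.contains pair.2 = false then
        d.insert pair.2 ((enumerated_list.filter (fun x => x.2 == pair.2)).map (·.1))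
      else d)
    PySem.Dict.empty).items

-- ===== PORT B =====
def word_positions_alt (words : List String) : List (String × List Int) :=
  ((PySem.List.enumerate words).foldl
    (fun d p => d.modify p.2 [] (· ++ [p.1]))
    PySem.Dict.empty).items

-- ===== PRECONDITION & SPEC =====
def Spec_word_positions (words : List String) (out : List (String × List Int)) : Prop := out = word_positions_alt words
instance (words : List String) (out : List (String × List Int)) : Decidable (Spec_word_positions words out) := by unfold Spec_word_positions; infer_instance

-- ===== CLAIM (what is proved, stated in full; the proofs are below) =====
def Claim_equal_word_positions : Prop := ∀ (words : List String), Dom_word_positions words → Spec_word_positions words (word_positions words)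

-- ===== LEMMAS AND PROOFS =====

-- Indices of word c in the enumerated list (the value both dicts store at key c).
def pvF (words : List String) (c : String) : List Int :=
  ((PySem.List.enumerate words).filter (fun x => x.2 == c)).map (·.1)

-- a list of pairs with Nodup first components maps identically under the overwrite map when (k,v) is already there
theorem pv_map_overwrite {κ ν : Type} [BEq κ] [LawfulBEq κ] (l : List (κ × ν)) (k : κ) (v : ν)
    (hnd : (l.map (·.1)).Nodup) (hmem : (k, v) ∈ l) :
    l.map (fun p => if p.1 == k then (k, v) else p) = l := by
  induction l with
  | nil => simp
  | cons p l ih =>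
    simp only [List.map_cons, List.nodup_cons, List.mem_map] at hnd
    rcases List.mem_cons.mp hmem with h | h
    · subst h
      simp only [List.map_cons, BEq.rfl, if_pos]
      congr 1
      have h2 : List.map (fun p => if (p.1 == k) = true then (k, v) else p) l = List.map id l := by
        apply List.map_congr_left
        intro q hq
        have : q.1 ≠ k := fun he => hnd.1 ⟨q, hq, he⟩
        simp [this]
      rw [h2, List.map_id]
    · have h1 : p.1 ≠ k := by
        intro he
        exact hnd.1 ⟨(k, v), h, by simp [he]⟩
      simp [h1, ih hnd.2 h]

theorem pv_insert_same {κ ν : Type} [BEq κ] [LawfulBEq κ] (d : PySem.Dict κ ν) (k : κ) (v : ν)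
    (hnd : d.keys.Nodup) (h : d.get? k = some v) : d.insert k v = d := by
  have hc : d.contains k = true := by
    rw [PySem.Dict.contains_eq_isSome_get?, h]; rfl
  apply PySem.Dict.ext
  rw [PySem.Dict.items_insert_of_contains _ _ hc]
  exact pv_map_overwrite d.items k v hnd (PySem.Dict.mem_items_of_get?_eq_some _ h)

-- A's conditional-insert fold equals an unconditional insert fold of the same (key-determined) values
theorem pv_condfold_eq (F : String → List Int) (l : List (Int × String)) (d : PySem.Dict String (List Int))
    (hnd : d.keys.Nodup) (hinv : ∀ k v, d.get? k = some v → v = F k) :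
    l.foldl (fun d p => if d.contains p.2 = false then d.insert p.2 (F p.2) else d) d
      = l.foldl (fun d p => d.insert p.2 (F p.2)) d := by
  induction l generalizing d with
  | nil => rfl
  | cons p l ih =>
    simp only [List.foldl_cons]
    by_cases hc : d.contains p.2 = false
    · rw [if_pos hc]
      refine ih _ (PySem.Dict.nodup_keys_insert _ _ _ hnd) ?_
      intro k v hv
      by_cases hk : k = p.2
      · subst hk
        rw [PySem.Dict.get?_insert_self] at hv
        exact (Option.some.inj hv).symm ▸ rfl
      · rw [PySem.Dict.get?_insert_of_ne _ _ hk] at hv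
        exact hinv k v hv
    · rw [if_neg hc]
      have hc' : d.contains p.2 = true := by
        cases h : d.contains p.2 <;> simp [h] at hc ⊢
      obtain ⟨v, hv⟩ := Option.isSome_iff_exists.mp
        (show (d.get? p.2).isSome = true from by
          rw [← PySem.Dict.contains_eq_isSome_get? d p.2]; exact hc')
      rw [show d.insert p.2 (F p.2) = d from by
        rw [← hinv p.2 v hv]; exact pv_insert_same d p.2 v hnd hv]
      exact ih d hnd hinv

-- getD after an unconditional insert fold
theorem pv_insfold_getD (F : String → List Int) (l : List (Int × String)) (d : PySem.Dict String (List Int)) (c : String) :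
    (l.foldl (fun d p => d.insert p.2 (F p.2)) d).getD c []
      = if c ∈ l.map (·.2) then F c else d.getD c [] := by
  induction l generalizing d with
  | nil => simp
  | cons p l ih =>
    simp only [List.foldl_cons, ih, List.map_cons, List.mem_cons]
    by_cases hm : c ∈ l.map (·.2)
    · simp [hm]
    · by_cases he : c = p.2
      · subst he; simp [hm, PySem.Dict.getD_insert_self]
      · simp [hm, he, PySem.Dict.getD_insert_of_ne _ _ _ he]

-- getD after B's modify-append fold is exactly pvF
theorem pv_modfold_getD (words : List String) (c : String) :
    ((PySem.List.enumerate words).foldl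
        (fun d p => d.modify p.2 [] (· ++ [p.1])) PySem.Dict.empty).getD c []
      = pvF words c := by
  have h1 : (PySem.List.enumerate words).foldl
        (fun d p => d.modify p.2 [] (· ++ [p.1])) PySem.Dict.empty
      = ((PySem.List.enumerate words).map Prod.swap).foldl
        (fun d p => d.modify p.1 [] (· ++ [p.2])) PySem.Dict.empty := by
    rw [List.foldl_map]; rfl
  rw [h1, PySem.Dict.getD_foldl_modify_append]

  simp only [PySem.Dict.getD_empty, List.nil_append, pvF, List.filter_map]
  rw [List.map_map]
  rfl

theorem word_positions_eq_alt (words : List String) :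
    word_positions words = word_positions_alt words := by
  unfold word_positions word_positions_alt
  show (List.foldl
      (fun d pair => if d.contains pair.2 = false then d.insert pair.2 (pvF words pair.2) else d)
      PySem.Dict.empty (PySem.List.enumerate words)).items = _
  rw [pv_condfold_eq (pvF words) _ _ PySem.Dict.nodup_keys_empty
    (by intro k v hv; simp [PySem.Dict.get?_empty] at hv)]
  have hkeysA : ((PySem.List.enumerate words).foldl
      (fun d p => d.insert p.2 (pvF words p.2)) PySem.Dict.empty).keys
      = PySem.Set.ofList words := by
    refine Eq.trans (PySem.Dict.keys_foldl_insert_key (PySem.List.enumerate words)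
      (fun p : Int × String => p.2) (fun _ p => pvF words p.2) PySem.Dict.empty) ?_
    rw [PySem.Dict.keys_empty, PySem.Set.update_nil_left, PySem.List.map_snd_enumerate]
  have hkeysB : ((PySem.List.enumerate words).foldl
      (fun d p => d.modify p.2 [] (· ++ [p.1])) PySem.Dict.empty).keys
      = PySem.Set.ofList words := by
    refine Eq.trans (PySem.Dict.keys_foldl_modify_key (PySem.List.enumerate words)
      (fun p : Int × String => p.2) [] (fun _ p => (· ++ [p.1])) PySem.Dict.empty) ?_
    rw [PySem.Dict.keys_empty, PySem.Set.update_nil_left, PySem.List.map_snd_enumerate]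
  have hndA : ((PySem.List.enumerate words).foldl
      (fun d p => d.insert p.2 (pvF words p.2)) PySem.Dict.empty).keys.Nodup :=
    PySem.Dict.nodup_keys_foldl_insert_key (PySem.List.enumerate words)
      (fun p : Int × String => p.2) (fun _ p => pvF words p.2) PySem.Dict.empty
      PySem.Dict.nodup_keys_empty
  have hndB : ((PySem.List.enumerate words).foldl
      (fun d p => d.modify p.2 [] (· ++ [p.1])) PySem.Dict.empty).keys.Nodup :=
    PySem.Dict.nodup_keys_foldl_modify_key (PySem.List.enumerate words)
      (fun p : Int × String => p.2) [] (fun _ p => (· ++ [p.1])) PySem.Dict.empty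
      PySem.Dict.nodup_keys_empty
  rw [PySem.Dict.items_eq_map_keys _ hndA [], PySem.Dict.items_eq_map_keys _ hndB []]
  rw [hkeysA, hkeysB]
  apply List.map_congr_left
  intro k hk
  have hkw : k ∈ words := (PySem.Set.mem_ofList words k).mp hk
  rw [pv_modfold_getD, pv_insfold_getD]
  rw [if_pos (by rw [PySem.List.map_snd_enumerate]; exact hkw)]

-- ===== VERDICT (by name: the statement is the Claim_ definition above) =====
theorem word_positions_spec : Claim_equal_word_positions := by
  intro words _
  exact word_positions_eq_alt words
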